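-- pv_equiv track=rewrite | github.com/mark-groves/skills-nexus | scripts/validate_repo.py | is_allowed_output_parent_path
-- ===== SOURCE A (Python) =====
-- def is_allowed_output_parent_path(path_ref: str) -> bool:
--     parts = path_ref.rstrip("/").split("/")
--     if not parts:
--         return False
--
--     parent_count = 0
--     for part in parts:
--         if part != "..":
--             break
--         parent_count += 1
--
--     if parent_count not in (1, 2):
--         return False
--     if len(parts) <= parent_count:
--         return False
--     if parts[parent_count] != "raw":
--         return False
--     return all(part not in ("", ".", "..") for part in parts[parent_count:])
-- ===== SOURCE B (Python) =====
-- def _tail_ok(rest: str) -> bool: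
--     return all(seg not in ("", ".", "..") for seg in rest.split("/"))
--
--
-- def is_allowed_output_parent_path(path_ref: str) -> bool:
--     s = path_ref.rstrip("/")
--     for p in ("../raw", "../../raw"):
--         if s == p:
--             return True
--         if s.startswith(p + "/"):
--             return _tail_ok(s[len(p) + 1:])
--     return False
-- ===== Notes on version B (the rewrite author's own statement) =====
-- stated objective: alternative
-- what changed: B replaces A's split-into-parts, leading-parent-count loop and index checks by direct string-prefix matching against the two allowed heads (one or two parent steps then the raw segment) followed by a single scan of the tail segments.
import Mathlib
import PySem

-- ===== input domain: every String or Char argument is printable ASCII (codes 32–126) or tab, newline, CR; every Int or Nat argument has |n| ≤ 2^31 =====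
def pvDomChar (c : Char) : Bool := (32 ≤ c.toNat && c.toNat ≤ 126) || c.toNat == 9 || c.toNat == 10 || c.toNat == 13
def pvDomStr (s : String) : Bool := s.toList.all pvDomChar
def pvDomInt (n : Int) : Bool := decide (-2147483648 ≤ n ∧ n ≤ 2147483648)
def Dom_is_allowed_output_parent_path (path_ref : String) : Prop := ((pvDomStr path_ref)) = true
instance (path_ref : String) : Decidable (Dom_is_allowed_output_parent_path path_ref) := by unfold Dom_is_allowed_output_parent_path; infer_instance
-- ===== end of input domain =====

-- B replaces A's split/count/index scan by direct string-prefix tests against '../raw' and '../../raw' plus one tail scan (objective: alternative, same cost).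

-- shared helper: hand port of Python's str.rstrip("/") — exact: drops exactly the trailing '/' characters
def pvRstripSlash (cs : List Char) : List Char := (cs.reverse.dropWhile (fun c => c = '/')).reverse

-- shared helper: port of `part not in ("", ".", "..")`
def pvSegOk (seg : List Char) : Bool := decide (¬(seg = [] ∨ seg = ['.'] ∨ seg = ['.', '.']))

-- ===== PORT A =====
-- port of A's for-loop with break: count leading ".." parts
def pvLeadCount : List (List Char) → Nat
  | [] => 0
  | p :: rest => if p = ['.', '.'] then pvLeadCount rest + 1 else 0

def is_allowed_output_parent_path (path_ref : String) : Bool :=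
  let parts := PySem.Chars.splitOn (pvRstripSlash path_ref.toList) ['/']
  if parts = [] then false
  else
    let pc := pvLeadCount parts
    if ¬(pc = 1 ∨ pc = 2) then false
    else if parts.length ≤ pc then false
    -- parts[parent_count]: the index is in range here (guarded above), so getD is exact
    else if ¬(PySem.List.pyGetD parts (pc : Int) [] = ['r', 'a', 'w']) then false
    else (PySem.List.slice parts (some (pc : Int)) none).all pvSegOk

-- ===== PORT B =====
def pvP1 : List Char := ['.', '.', '/', 'r', 'a', 'w']
def pvP2 : List Char := ['.', '.', '/', '.', '.', '/', 'r', 'a', 'w']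

def pvTailOk (rest : List Char) : Bool :=
  (PySem.Chars.splitOn rest ['/']).all pvSegOk

-- one iteration of B's `for p in (...)` loop body (the two early returns become `some`)
def pvTryPrefix (s p : List Char) : Option Bool :=
  if s = p then some true
  else if PySem.Chars.startswith s (p ++ ['/']) then
    some (pvTailOk (PySem.List.slice s (some ((p.length + 1 : Nat) : Int)) none))
  else none

def is_allowed_output_parent_path_alt (path_ref : String) : Bool :=
  let s := pvRstripSlash path_ref.toList
  match pvTryPrefix s pvP1 with
  | some b => b
  | none =>
    match pvTryPrefix s pvP2 with
    | some b => b
    | none => false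

-- ===== PRECONDITION & SPEC =====
def Spec_is_allowed_output_parent_path (path_ref : String) (out : Bool) : Prop := out = is_allowed_output_parent_path_alt path_ref
instance (path_ref : String) (out : Bool) : Decidable (Spec_is_allowed_output_parent_path path_ref out) := by unfold Spec_is_allowed_output_parent_path; infer_instance

-- ===== CLAIM (what is proved, stated in full; the proofs are below) =====
def Claim_equal_is_allowed_output_parent_path : Prop := ∀ (path_ref : String), Dom_is_allowed_output_parent_path path_ref → Spec_is_allowed_output_parent_path path_ref (is_allowed_output_parent_path path_ref)

-- ===== LEMMAS AND PROOFS =====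

theorem modifyHead_fun_id {α : Type} (l : List α) : l.modifyHead (fun x => x) = l := by
  cases l <;> simp

-- reference splitter: pvSp cs = cs.split('/')
def pvSp : List Char → List (List Char)
  | [] => [[]]
  | c :: t =>
    if c = '/' then [] :: pvSp t
    else
      match pvSp t with
      | [] => [[c]]
      | p :: ps => (c :: p) :: ps

theorem pvSp_ne_nil (cs : List Char) : pvSp cs ≠ [] := by
  cases cs with
  | nil => simp [pvSp]
  | cons c t =>
    simp only [pvSp]
    split
    · simp
    · split <;> simp

theorem pvGo_eq : ∀ (fuel : Nat) (l cur : List Char) (acc : List (List Char)), l.length ≤ fuel →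
    PySem.Chars.splitOn.go ['/'] fuel l cur acc = acc.reverse ++ (pvSp l).modifyHead (cur.reverse ++ ·) := by
  intro fuel
  induction fuel with
  | zero =>
    intro l cur acc h
    have : l = [] := by cases l <;> simp_all
    subst this
    rw [PySem.Chars.splitOn.go]
    simp [pvSp]
  | succ n ih =>
    intro l cur acc h
    cases l with
    | nil => rw [PySem.Chars.splitOn.go]; simp [pvSp]; omega
    | cons c rest =>
      rw [PySem.Chars.splitOn.go]
      by_cases hc : c = '/'
      · subst hc
        have hp : List.isPrefixOf ['/'] ('/' :: rest) = true := by simp [List.isPrefixOf]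
        simp only [hp, if_true, List.length_cons, List.drop_succ_cons, List.length_nil, List.drop_zero]
        rw [ih rest [] (cur.reverse :: acc) (by simpa using Nat.le_of_succ_le_succ h)]
        simp [pvSp, modifyHead_fun_id]
      · have hp : List.isPrefixOf ['/'] (c :: rest) = false := by
          simp [List.isPrefixOf, BEq.beq]
          intro hh; exact hc hh.symm
        simp only [hp, Bool.false_eq_true, if_false]
        rw [ih rest (c :: cur) acc (by simpa using Nat.le_of_succ_le_succ h)]
        simp only [pvSp, hc, if_false]
        rcases hsp : pvSp rest with _ | ⟨p, ps⟩
        · exact absurd hsp (pvSp_ne_nil rest)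
        · simp

theorem pvSplitOn_eq (cs : List Char) : PySem.Chars.splitOn cs ['/'] = pvSp cs := by
  rw [PySem.Chars.splitOn]
  rw [pvGo_eq (cs.length + 1) cs [] [] (by omega)]
  simp [modifyHead_fun_id]

theorem pvSp_append (a b : List Char) : pvSp (a ++ '/' :: b) = pvSp a ++ pvSp b := by
  induction a with
  | nil => simp [pvSp]
  | cons c a ih =>
    by_cases hc : c = '/'
    · subst hc
      simp only [List.cons_append, pvSp, if_true, ih, List.cons_append]
    · simp only [List.cons_append, pvSp, hc, if_false, ih]
      rcases hsp : pvSp a with _ | ⟨p, ps⟩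
      · exact absurd hsp (pvSp_ne_nil a)
      · simp

-- join: left inverse of pvSp
def pvJn : List (List Char) → List Char
  | [] => []
  | [p] => p
  | p :: q :: ps => p ++ '/' :: pvJn (q :: ps)

theorem pvJn_pvSp (cs : List Char) : pvJn (pvSp cs) = cs := by
  induction cs with
  | nil => rfl
  | cons c t ih =>
    by_cases hc : c = '/'
    · subst hc
      simp only [pvSp, if_true]
      rcases hsp : pvSp t with _ | ⟨p, ps⟩
      · exact absurd hsp (pvSp_ne_nil t)
      · rw [hsp] at ih
        simp [pvJn, ih]
    · simp only [pvSp, hc, if_false]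
      rcases hsp : pvSp t with _ | ⟨p, ps⟩
      · exact absurd hsp (pvSp_ne_nil t)
      · rw [hsp] at ih
        rcases ps with _ | ⟨q, ps'⟩
        · simp only [pvJn] at ih ⊢
          rw [ih]
        · simp only [pvJn] at ih ⊢
          rw [List.cons_append, ih]

-- the common characterisation of both programs, stated on the split parts
def pvCp (parts : List (List Char)) : Prop :=
  (∃ rest, parts = ['.', '.'] :: ['r', 'a', 'w'] :: rest ∧ rest.all pvSegOk = true) ∨
  (∃ rest, parts = ['.', '.'] :: ['.', '.'] :: ['r', 'a', 'w'] :: rest ∧ rest.all pvSegOk = true)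

theorem pvA_iff (pr : String) :
    is_allowed_output_parent_path pr = true ↔ pvCp (pvSp (pvRstripSlash pr.toList)) := by
  simp only [is_allowed_output_parent_path, pvSplitOn_eq]
  generalize pvSp (pvRstripSlash pr.toList) = parts
  rcases parts with _ | ⟨a, tail⟩
  · simp [pvCp]
  · by_cases ha : a = ['.', '.']
    · subst ha
      rcases tail with _ | ⟨b, tail2⟩
      · simp [pvLeadCount, pvCp]
      · by_cases hb : b = ['.', '.']
        · subst hb
          rcases tail2 with _ | ⟨c2, tail3⟩
          · simp [pvLeadCount, pvCp]
          · by_cases hc2 : c2 = ['.', '.']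
            · subst hc2
              simp [pvLeadCount, pvCp]
            · by_cases hraw : c2 = ['r', 'a', 'w']
              · subst hraw
                simp [pvLeadCount, pvCp, PySem.List.pyGetD_ofNat',
                  PySem.List.slice_from, pvSegOk]
              · simp [pvLeadCount, pvCp, PySem.List.pyGetD_ofNat', hc2, hraw]
        · by_cases hraw : b = ['r', 'a', 'w']
          · subst hraw
            simp [pvLeadCount, pvCp, PySem.List.pyGetD_ofNat',
              PySem.List.slice_from, pvSegOk]
          · simp [pvLeadCount, pvCp, PySem.List.pyGetD_ofNat', hb, hraw]
    · simp [pvLeadCount, pvCp, ha]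

theorem pvB_iff (pr : String) :
    is_allowed_output_parent_path_alt pr = true ↔ pvCp (pvSp (pvRstripSlash pr.toList)) := by
  simp only [is_allowed_output_parent_path_alt]
  generalize pvRstripSlash pr.toList = cs
  simp only [pvTryPrefix]
  by_cases h1 : cs = pvP1
  · subst h1
    have hsp : pvSp pvP1 = [['.', '.'], ['r', 'a', 'w']] := by decide
    simp [hsp, pvCp]
  · by_cases h2 : PySem.Chars.startswith cs (pvP1 ++ ['/']) = true
    · obtain ⟨t, ht⟩ := (PySem.Chars.startswith_iff cs (pvP1 ++ ['/'])).mp h2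
      have hcs : cs = pvP1 ++ '/' :: t := by rw [← ht]; simp
      subst hcs
      have hsl : PySem.List.slice (pvP1 ++ '/' :: t) (some ((pvP1.length + 1 : Nat) : Int)) none = t := by
        rw [PySem.List.slice_from _ (Int.natCast_nonneg _)]
        simp [pvP1]
      have hsp : pvSp (pvP1 ++ '/' :: t) = [['.', '.'], ['r', 'a', 'w']] ++ pvSp t := by
        rw [pvSp_append]; rfl
      simp only [if_neg h1, h2, if_true, hsl, hsp]
      unfold pvTailOk
      rw [pvSplitOn_eq]
      constructor
      · intro h
        exact Or.inl ⟨pvSp t, rfl, h⟩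
      · rintro (⟨rest, heq, hall⟩ | ⟨rest, heq, hall⟩)
        · simp only [List.cons_append, List.nil_append, List.cons.injEq] at heq
          rw [heq.2.2]
          exact hall
        · simp at heq
    · by_cases h3 : cs = pvP2
      · subst h3
        have hsp : pvSp pvP2 = [['.', '.'], ['.', '.'], ['r', 'a', 'w']] := by decide
        simp only [if_neg h1, h2, Bool.false_eq_true, if_false]
        simp [hsp, pvCp]
      · by_cases h4 : PySem.Chars.startswith cs (pvP2 ++ ['/']) = true
        · obtain ⟨t, ht⟩ := (PySem.Chars.startswith_iff cs (pvP2 ++ ['/'])).mp h4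
          have hcs : cs = pvP2 ++ '/' :: t := by rw [← ht]; simp
          subst hcs
          have hsl : PySem.List.slice (pvP2 ++ '/' :: t) (some ((pvP2.length + 1 : Nat) : Int)) none = t := by
            rw [PySem.List.slice_from _ (Int.natCast_nonneg _)]
            simp [pvP2]
          have hsp : pvSp (pvP2 ++ '/' :: t) = [['.', '.'], ['.', '.'], ['r', 'a', 'w']] ++ pvSp t := by
            rw [pvSp_append]; rfl
          simp only [if_neg h1, h2, Bool.false_eq_true, if_false, if_neg h3, h4, if_true, hsl, hsp]
          unfold pvTailOk
          rw [pvSplitOn_eq]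
          constructor
          · intro h
            exact Or.inr ⟨pvSp t, rfl, h⟩
          · rintro (⟨rest, heq, hall⟩ | ⟨rest, heq, hall⟩)
            · simp at heq
            · simp only [List.cons_append, List.nil_append, List.cons.injEq] at heq
              rw [heq.2.2.2]
              exact hall
        · simp only [if_neg h1, h2, Bool.false_eq_true, if_false, if_neg h3, h4]
          constructor
          · intro h
            exact absurd h (by simp)
          · rintro (⟨rest, heq, hall⟩ | ⟨rest, heq, hall⟩)
            · have hcs := pvJn_pvSp cs
              rw [heq] at hcs
              rcases rest with _ | ⟨r, rs⟩
              · exact absurd (by rw [← hcs]; decide) h1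
              · refine absurd ((PySem.Chars.startswith_iff cs (pvP1 ++ ['/'])).mpr ⟨pvJn (r :: rs), ?_⟩) h2
                rw [← hcs]
                simp [pvJn, pvP1]
            · have hcs := pvJn_pvSp cs
              rw [heq] at hcs
              rcases rest with _ | ⟨r, rs⟩
              · exact absurd (by rw [← hcs]; decide) h3
              · refine absurd ((PySem.Chars.startswith_iff cs (pvP2 ++ ['/'])).mpr ⟨pvJn (r :: rs), ?_⟩) h4
                rw [← hcs]
                simp [pvJn, pvP2]

theorem pvMain (pr : String) : is_allowed_output_parent_path pr = is_allowed_output_parent_path_alt pr :=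
  Bool.eq_iff_iff.mpr ((pvA_iff pr).trans (pvB_iff pr).symm)

-- ===== VERDICT (by name: the statement is the Claim_ definition above) =====
theorem is_allowed_output_parent_path_spec : Claim_equal_is_allowed_output_parent_path := by
  intro path_ref _
  exact pvMain path_ref
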